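-- pv_equiv track=rewrite | github.com/shhuan1989/algorithms | leetcode/hard/string-transforms-into-another-string.py | canConvert
-- ===== SOURCE A (Python) =====
-- import collections
--
-- def canConvert(a: str, b: str) -> bool:
--     if len(set(b))==26 and len(set(a))==26 and a!=b:
--         return False
--     if len(a)!=len(b):
--         return False
--     d=collections.defaultdict(list)
--     for i in range(len(a)):
--         d[a[i]].append(i)
--     for c in d.keys():
--         r=b[d[c][0]]
--         for i in d[c]:
--             if b[i]!=r:
--                 return False
--     return True
-- ===== SOURCE B (Python) =====
-- def canConvert(a: str, b: str) -> bool: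
--     if len(set(b)) == 26 and len(set(a)) == 26 and a != b:
--         return False
--     if len(a) != len(b):
--         return False
--     m = {}
--     for x, y in zip(a, b):
--         if x in m:
--             if m[x] != y:
--                 return False
--         else:
--             m[x] = y
--     return True
-- ===== Notes on version B (the rewrite author's own statement) =====
-- stated objective: simpler
-- what changed: Replaces the char->position-list grouping dict plus a second verification scan of b with a single pass over zip(a,b) that maintains a direct char->char mapping and fails on the first conflicting pair.
import Mathlib
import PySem

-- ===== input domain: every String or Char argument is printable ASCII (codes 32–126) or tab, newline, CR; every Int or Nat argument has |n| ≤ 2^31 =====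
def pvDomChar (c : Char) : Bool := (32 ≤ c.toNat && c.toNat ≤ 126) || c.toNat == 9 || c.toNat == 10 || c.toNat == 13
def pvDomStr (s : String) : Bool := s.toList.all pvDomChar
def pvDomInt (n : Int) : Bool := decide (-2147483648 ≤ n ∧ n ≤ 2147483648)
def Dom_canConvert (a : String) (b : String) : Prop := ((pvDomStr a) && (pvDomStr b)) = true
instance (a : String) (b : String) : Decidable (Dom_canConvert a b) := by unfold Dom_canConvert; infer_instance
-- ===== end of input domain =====

-- B replaces A's char->position-list grouping dict plus re-scan of b with a single pass over
-- zip(a,b) maintaining a direct char->char map (simpler; same exact return value).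

-- ===== PORT A =====
def canConvert (a : String) (b : String) : Bool :=
  if (PySem.Set.len (PySem.Set.ofList b.toList) == 26)
      && (PySem.Set.len (PySem.Set.ofList a.toList) == 26)
      && (a.toList != b.toList) then false
  else if PySem.List.len a.toList != PySem.List.len b.toList then false
  else
    -- d = defaultdict(list); for i in range(len(a)): d[a[i]].append(i)
    -- i ranges over range(len(a)), so a[i] never raises; pyGetD is exact there
    let d : PySem.Dict Char (List Int) :=
      (PySem.List.pyRange 0 (PySem.List.len a.toList) 1).foldl
        (fun d i => d.modify (PySem.List.pyGetD a.toList i ' ') [] (· ++ [i])) PySem.Dict.empty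
    -- for c in d.keys(): r = b[d[c][0]]; for i in d[c]: if b[i] != r: return False
    -- (early return ↔ all; d[c][0] and every i are in range of b after the length guard, so the
    --  Option equality below is exactly the char equality Python tests; 'none' is unreachable)
    d.keys.all (fun c =>
      match PySem.List.pyGet? (d.getD c []) 0 with
      | none => true
      | some i0 => (d.getD c []).all
          (fun i => PySem.List.pyGet? b.toList i == PySem.List.pyGet? b.toList i0))

-- ===== PORT B =====
-- B-side helper: one step of B's scan over zip(a, b); 'none' = the scan has already returned False
def stepB (st : Option (PySem.Dict Char Char)) (p : Char × Char) : Option (PySem.Dict Char Char) :=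
  match st with
  | none => none
  | some m =>
    match m.get? p.1 with
    | some y => if p.2 == y then some m else none
    | none => some (m.insert p.1 p.2)

def canConvert_alt (a : String) (b : String) : Bool :=
  if (PySem.Set.len (PySem.Set.ofList b.toList) == 26)
      && (PySem.Set.len (PySem.Set.ofList a.toList) == 26)
      && (a.toList != b.toList) then false
  else if PySem.List.len a.toList != PySem.List.len b.toList then false
  else
    ((a.toList.zip b.toList).foldl stepB
      (some (PySem.Dict.empty : PySem.Dict Char Char))).isSome

-- ===== PRECONDITION & SPEC =====
def Spec_canConvert (a : String) (b : String) (out : Bool) : Prop := out = canConvert_alt a b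
instance (a : String) (b : String) (out : Bool) : Decidable (Spec_canConvert a b out) := by unfold Spec_canConvert; infer_instance

-- ===== CLAIM (what is proved, stated in full; the proofs are below) =====
def Claim_equal_canConvert : Prop := ∀ (a : String) (b : String), Dom_canConvert a b → Spec_canConvert a b (canConvert a b)

-- ===== LEMMAS AND PROOFS =====

-- the common meaning of both loops: equal chars of a at any two positions force equal chars of b
def Consist (la lb : List Char) : Prop :=
  ∀ (i j : Nat), i < la.length → j < la.length → i < lb.length → j < lb.length →
    la.getD i ' ' = la.getD j ' ' → lb.getD i ' ' = lb.getD j ' '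

-- the position list A's dict stores under key c
def posList (la : List Char) (c : Char) : List Int :=
  (PySem.List.pyRange 0 (PySem.List.len la) 1).filter (fun i => PySem.List.pyGetD la i ' ' == c)

lemma mem_posList (la : List Char) (c : Char) (i : Int) :
    i ∈ posList la c ↔ 0 ≤ i ∧ i < la.length ∧ PySem.List.pyGetD la i ' ' = c := by
  simp [posList, List.mem_filter, PySem.List.mem_pyRange_one, PySem.List.len_eq, and_assoc]

lemma dA_getD (la : List Char) (c : Char) :
    ((PySem.List.pyRange 0 (PySem.List.len la) 1).foldl
        (fun d i => d.modify (PySem.List.pyGetD la i ' ') [] (· ++ [i]))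
        (PySem.Dict.empty : PySem.Dict Char (List Int))).getD c [] = posList la c := by
  have h : (PySem.List.pyRange 0 (PySem.List.len la) 1).foldl
        (fun d i => d.modify (PySem.List.pyGetD la i ' ') [] (· ++ [i]))
        (PySem.Dict.empty : PySem.Dict Char (List Int))
      = ((PySem.List.pyRange 0 (PySem.List.len la) 1).map
          (fun i => (PySem.List.pyGetD la i ' ', i))).foldl
          (fun d p => d.modify p.1 [] (· ++ [p.2])) PySem.Dict.empty := by
    rw [List.foldl_map]
  rw [h, PySem.Dict.getD_foldl_modify_append]
  simp [posList, List.filter_map, List.map_map, Function.comp_def]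

lemma dA_keys (la : List Char) :
    ((PySem.List.pyRange 0 (PySem.List.len la) 1).foldl
        (fun d i => d.modify (PySem.List.pyGetD la i ' ') [] (· ++ [i]))
        (PySem.Dict.empty : PySem.Dict Char (List Int))).keys = PySem.Set.ofList la := by
  rw [PySem.Dict.keys_foldl_modify_key]
  rw [show (PySem.Dict.empty : PySem.Dict Char (List Int)).keys = [] from rfl]
  rw [PySem.List.map_pyGetD_pyRange_zero]
  exact (PySem.Set.ofList_eq_foldl la).symm ▸ rfl

lemma loopB_none (ps : List (Char × Char)) : ps.foldl stepB none = none := by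
  induction ps with
  | nil => rfl
  | cons p rest ih => simpa [stepB] using ih

lemma loopB_iff (ps : List (Char × Char)) (m : PySem.Dict Char Char) :
    (ps.foldl stepB (some m)).isSome = true ↔
      (∀ q ∈ ps, ∀ y, m.get? q.1 = some y → q.2 = y) ∧
      ps.Pairwise (fun p q => p.1 = q.1 → p.2 = q.2) := by
  induction ps generalizing m with
  | nil => simp
  | cons p rest ih =>
    rw [List.foldl_cons]
    rcases h : m.get? p.1 with _ | y
    · have hs : stepB (some m) p = some (m.insert p.1 p.2) := by simp [stepB, h]
      rw [hs, ih]
      simp only [List.pairwise_cons, List.forall_mem_cons]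
      constructor
      · rintro ⟨hG, hP⟩
        refine ⟨⟨fun y hy => by simp [h] at hy, fun q hq y hy => hG q hq y ?_⟩, fun q hq hqp => ?_, hP⟩
        · rcases eq_or_ne q.1 p.1 with he | he
          · rw [he, h] at hy; cases hy
          · rwa [PySem.Dict.get?_insert_of_ne _ _ he]
        · exact (hG q hq p.2 (by rw [← hqp]; exact PySem.Dict.get?_insert_self _ _ _)).symm
      · rintro ⟨⟨_, hG⟩, hh, hP⟩
        refine ⟨fun q hq y hy => ?_, hP⟩
        rcases eq_or_ne q.1 p.1 with he | he
        · rw [he, PySem.Dict.get?_insert_self] at hy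
          cases hy; exact (hh q hq he.symm).symm
        · rw [PySem.Dict.get?_insert_of_ne _ _ he] at hy
          exact hG q hq y hy
    · by_cases he : p.2 = y
      · have hs : stepB (some m) p = some m := by simp [stepB, h, he]
        rw [hs, ih]
        simp only [List.pairwise_cons, List.forall_mem_cons]
        constructor
        · rintro ⟨hG, hP⟩
          refine ⟨⟨fun y' hy' => by rw [h] at hy'; cases hy'; exact he, hG⟩,
            fun q hq hqp => ?_, hP⟩
          subst he
          exact (hG q hq p.2 (by rw [← hqp, h])).symm
        · rintro ⟨⟨_, hG⟩, _, hP⟩; exact ⟨hG, hP⟩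
      · have hs : stepB (some m) p = none := by simp [stepB, h, he]
        rw [hs, loopB_none]
        simp only [Option.isSome_none, Bool.false_eq_true, false_iff, not_and,
          List.forall_mem_cons]
        rintro ⟨hp, _⟩
        exact absurd (hp y h) he

lemma B_iff (la lb : List Char) (hlen : lb.length = la.length) :
    ((la.zip lb).foldl stepB (some (PySem.Dict.empty : PySem.Dict Char Char))).isSome = true ↔
      Consist la lb := by
  rw [loopB_iff]
  have hz : (la.zip lb).length = la.length := by simp [hlen]
  constructor
  · rintro ⟨-, hP⟩ i j hi hj hi' hj' heq
    rw [List.pairwise_iff_getElem] at hP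
    rcases lt_trichotomy i j with hij | hij | hij
    · have := hP i j (by omega) (by omega) hij
      simp only [List.getElem_zip] at this
      rw [List.getD_eq_getElem _ _ hi', List.getD_eq_getElem _ _ hj']
      exact this (by rw [← List.getD_eq_getElem _ (' ') hi, ← List.getD_eq_getElem _ (' ') hj]; exact heq)
    · subst hij; rfl
    · have := hP j i (by omega) (by omega) hij
      simp only [List.getElem_zip] at this
      rw [List.getD_eq_getElem _ _ hi', List.getD_eq_getElem _ _ hj']
      exact (this (by rw [← List.getD_eq_getElem _ (' ') hi, ← List.getD_eq_getElem _ (' ') hj]; exact heq.symm)).symm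
  · intro hC
    refine ⟨fun q hq y hy => by simp [PySem.Dict.get?_empty] at hy, ?_⟩
    rw [List.pairwise_iff_getElem]
    intro i j hi hj hij heq
    simp only [List.getElem_zip] at heq ⊢
    have h1 : i < la.length := by omega
    have h2 : j < la.length := by omega
    have h3 : i < lb.length := by omega
    have h4 : j < lb.length := by omega
    have := hC i j h1 h2 h3 h4 (by rw [List.getD_eq_getElem _ _ h1, List.getD_eq_getElem _ _ h2]; exact heq)
    rwa [List.getD_eq_getElem _ _ h3, List.getD_eq_getElem _ _ h4] at this

lemma A_iff (la lb : List Char) (hlen : lb.length = la.length) :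
    ((PySem.Set.ofList la).all (fun c =>
      match PySem.List.pyGet? (posList la c) 0 with
      | none => true
      | some i0 => (posList la c).all
          (fun i => PySem.List.pyGet? lb i == PySem.List.pyGet? lb i0)) = true) ↔
      Consist la lb := by
  rw [List.all_eq_true]
  constructor
  · intro hall i j hi hj hi' hj' heq
    set c := la.getD i ' ' with hc
    have hcm : c ∈ la := by
      rw [hc, List.getD_eq_getElem _ _ hi]; exact List.getElem_mem hi
    have hfc := hall c ((PySem.Set.mem_ofList la c).mpr hcm)
    have hmi : (i : Int) ∈ posList la c := by
      rw [mem_posList]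
      exact ⟨Int.natCast_nonneg i, by exact_mod_cast hi, by simp [hc]⟩
    have hmj : (j : Int) ∈ posList la c := by
      rw [mem_posList]
      refine ⟨Int.natCast_nonneg j, by exact_mod_cast hj, ?_⟩
      simp only [PySem.List.pyGetD_natCast]
      exact heq.symm
    rcases h0 : PySem.List.pyGet? (posList la c) 0 with _ | i0
    · rw [PySem.List.pyGet?_zero] at h0
      cases hps : posList la c with
      | nil => rw [hps] at hmi; cases hmi
      | cons x t => rw [hps] at h0; simp at h0
    · simp only [h0, List.all_eq_true] at hfc
      have e1 := hfc _ hmi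
      have e2 := hfc _ hmj
      rw [beq_iff_eq] at e1 e2
      have : PySem.List.pyGet? lb (i : Int) = PySem.List.pyGet? lb (j : Int) := by rw [e1, e2]
      rw [PySem.List.pyGet?_natCast, PySem.List.pyGet?_natCast,
        List.getElem?_eq_getElem hi', List.getElem?_eq_getElem hj'] at this
      rw [List.getD_eq_getElem _ _ hi', List.getD_eq_getElem _ _ hj']
      exact Option.some_injective _ this
  · intro hC c hcm
    rcases h0 : PySem.List.pyGet? (posList la c) 0 with _ | i0
    · rfl
    · simp only [List.all_eq_true]
      intro i hi
      have h1 := (mem_posList la c i).mp hi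
      have h2 := (mem_posList la c i0).mp (PySem.List.mem_of_pyGet?_eq_some _ h0)
      obtain ⟨hi0, hilt, hic⟩ := h1
      obtain ⟨h00, h0lt, h0c⟩ := h2
      have hna : i.toNat < la.length := by omega
      have h0a : i0.toNat < la.length := by omega
      have hga : la[i.toNat] = la[i0.toNat] := by
        rw [← PySem.List.pyGetD_eq_getElem la ' ' hi0 (by simpa using hilt),
          ← PySem.List.pyGetD_eq_getElem la ' ' h00 (by simpa using h0lt), hic, h0c]
      have := hC i.toNat i0.toNat hna h0a (by omega) (by omega)
        (by rw [List.getD_eq_getElem _ _ hna, List.getD_eq_getElem _ _ h0a]; exact hga)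
      rw [List.getD_eq_getElem _ _ (show i.toNat < lb.length by omega),
        List.getD_eq_getElem _ _ (show i0.toNat < lb.length by omega)] at this
      rw [PySem.List.pyGet?_eq_some_getElem lb hi0 (by rw [hlen]; exact hilt),
        PySem.List.pyGet?_eq_some_getElem lb h00 (by rw [hlen]; exact h0lt)]
      simp [this]

-- ===== VERDICT (by name: the statement is the Claim_ definition above) =====
set_option maxRecDepth 8192 in
theorem canConvert_spec : Claim_equal_canConvert := by
  intro a b _
  unfold Spec_canConvert canConvert canConvert_alt
  split_ifs with h1 h2
  · rfl
  · rfl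
  · have hlen : b.toList.length = a.toList.length := by
      have h2' : PySem.List.len a.toList = PySem.List.len b.toList := by
        rcases eq_or_ne (PySem.List.len a.toList) (PySem.List.len b.toList) with h | h
        · exact h
        · exact absurd (bne_iff_ne.mpr h) h2
      simp only [PySem.List.len_eq] at h2'
      exact_mod_cast h2'.symm
    simp only [dA_getD, dA_keys]
    rw [Bool.eq_iff_iff, A_iff _ _ hlen, B_iff _ _ hlen]
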